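-- pv_equiv track=rewrite | github.com/JapanColorado/article-to-anki | articles-to-anki.py | split_cards
-- ===== SOURCE A (Python) =====
-- from typing import Tuple, Optional, List
--
-- def split_cards(generated_text: str) -> Tuple[List[str], List[str]]:
--     """
--     Splits the generated text into two lists of Anki cards: one for cloze cards and
--         one for basic cards, based on their respective section headers in the text.
--     """
--     cloze_cards: List[str] = []
--     basic_cards: List[str] = []
--     current_section: Optional[str] = None
--     for line in generated_text.splitlines():
--         line = line.strip()
--         if not line:
--             continue
--         if line.upper().startswith("CLOZE"):
--             current_section = "cloze"
--             continue
--         if line.upper().startswith("BASIC"):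
--             current_section = "basic"
--             continue
--         if current_section == "cloze":
--             cloze_cards.append(line)
--         elif current_section == "basic":
--             basic_cards.append(line)
--     return cloze_cards, basic_cards
-- ===== SOURCE B (Python) =====
-- from typing import Tuple, List, Optional
--
-- def _kind(line: str) -> Optional[str]:
--     u = line.upper()
--     if u.startswith("CLOZE"):
--         return "cloze"
--     if u.startswith("BASIC"):
--         return "basic"
--     return None
--
-- def split_cards(generated_text: str) -> Tuple[List[str], List[str]]:
--     """Segment the stripped lines at the section headers, then pour each
--     header's block (blanks dropped) into the matching list."""
--     lines = [raw.strip() for raw in generated_text.splitlines()]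
--     # drop everything before the first header
--     while lines and _kind(lines[0]) is None:
--         lines = lines[1:]
--     cloze: List[str] = []
--     basic: List[str] = []
--     while lines:
--         k = _kind(lines[0])
--         rest = lines[1:]
--         body = [l for l in _take_until_header(rest) if l]
--         if k == "cloze":
--             cloze.extend(body)
--         else:
--             basic.extend(body)
--         lines = rest[len(_take_until_header(rest)):]
--     return cloze, basic
--
-- def _take_until_header(lines: List[str]) -> List[str]:
--     out = []
--     for l in lines:
--         if _kind(l) is not None:
--             break
--         out.append(l)
--     return out
-- ===== Notes on version B (the rewrite author's own statement) =====
-- stated objective: alternative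
-- what changed: Replaces the per-line current-section state machine with a segment decomposition: drop the preamble before the first header, then repeatedly split off each header's block with take/drop-until-next-header and pour its non-blank stripped lines into the matching list.
import Mathlib
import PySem

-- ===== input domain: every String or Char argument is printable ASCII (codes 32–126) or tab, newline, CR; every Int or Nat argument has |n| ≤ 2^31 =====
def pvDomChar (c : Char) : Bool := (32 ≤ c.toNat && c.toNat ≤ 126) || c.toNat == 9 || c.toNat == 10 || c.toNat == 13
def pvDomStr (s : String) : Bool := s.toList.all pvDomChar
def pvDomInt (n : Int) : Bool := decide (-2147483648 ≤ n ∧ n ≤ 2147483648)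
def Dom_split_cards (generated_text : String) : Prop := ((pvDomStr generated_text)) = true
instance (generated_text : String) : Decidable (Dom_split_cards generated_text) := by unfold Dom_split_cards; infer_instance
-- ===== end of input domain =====

-- B replaces A's per-line current-section state machine by a segment decomposition
-- (drop the preamble, then split off each header's block and pour it into its list);
-- objective: alternative structure, same cost.

-- ===== PORT A =====
-- the loop body of A's for-loop over splitlines, state = (cloze_cards, basic_cards, current_section)
def stepA (st : List String × List String × Option String) (raw : String) :
    List String × List String × Option String :=
  let line := PySem.Str.strip raw
  if line = "" then st
  else if PySem.Str.startswith (PySem.Str.upper line) "CLOZE" then (st.1, st.2.1, some "cloze")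
  else if PySem.Str.startswith (PySem.Str.upper line) "BASIC" then (st.1, st.2.1, some "basic")
  else if st.2.2 = some "cloze" then (st.1 ++ [line], st.2.1, st.2.2)
  else if st.2.2 = some "basic" then (st.1, st.2.1 ++ [line], st.2.2)
  else st

def split_cards (generated_text : String) : List String × List String :=
  let r := (PySem.Str.splitlines generated_text).foldl stepA
    (([] : List String), ([] : List String), (none : Option String))
  (r.1, r.2.1)

-- ===== PORT B =====
-- Source B's _kind
def kindOf (line : String) : Option String :=
  let u := PySem.Str.upper line
  if PySem.Str.startswith u "CLOZE" then some "cloze"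
  else if PySem.Str.startswith u "BASIC" then some "basic"
  else none

-- '_kind(x) is None', the condition of Source B's preamble drop and of _take_until_header
def noK (x : String) : Bool := (kindOf x).isNone

-- Source B's outer while-loop: one header's block per step
-- (rest[len(take):] of Source B is exactly dropWhile, since takeWhile ++ dropWhile = rest)
def goB (lines : List String) : List String × List String :=
  match lines with
  | [] => ([], [])
  | l :: rest =>
    let body := (rest.takeWhile noK).filter (fun x => x ≠ "")
    let r := goB (rest.dropWhile noK)
    if kindOf l = some "cloze" then (body ++ r.1, r.2) else (r.1, body ++ r.2)
termination_by lines.length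
decreasing_by
  simp only [List.length_cons]
  have := List.length_dropWhile_le noK rest
  omega

def split_cards_alt (generated_text : String) : List String × List String :=
  goB (((PySem.Str.splitlines generated_text).map PySem.Str.strip).dropWhile noK)

-- ===== PRECONDITION & SPEC =====
def Spec_split_cards (generated_text : String) (out : List String × List String) : Prop := out = split_cards_alt generated_text
instance (generated_text : String) (out : List String × List String) : Decidable (Spec_split_cards generated_text out) := by unfold Spec_split_cards; infer_instance

-- ===== CLAIM (what is proved, stated in full; the proofs are below) =====
def Claim_equal_split_cards : Prop := ∀ (generated_text : String), Dom_split_cards generated_text → Spec_split_cards generated_text (split_cards generated_text)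

-- ===== LEMMAS AND PROOFS =====

-- the delta semantics of A's loop on already-stripped lines: what a run from state s appends
def F : Option String → List String → List String × List String × Option String
  | s, [] => ([], [], s)
  | s, l :: rest =>
    if l = "" then F s rest
    else if PySem.Str.startswith (PySem.Str.upper l) "CLOZE" then F (some "cloze") rest
    else if PySem.Str.startswith (PySem.Str.upper l) "BASIC" then F (some "basic") rest
    else if s = some "cloze" then
      let r := F s rest; (l :: r.1, r.2.1, r.2.2)
    else if s = some "basic" then
      let r := F s rest; (r.1, l :: r.2.1, r.2.2)
    else F s rest

theorem foldl_stepA_eq (ls : List String) : ∀ (c b : List String) (s : Option String),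
    ls.foldl stepA (c, b, s) =
      (c ++ (F s (ls.map PySem.Str.strip)).1, b ++ (F s (ls.map PySem.Str.strip)).2.1,
        (F s (ls.map PySem.Str.strip)).2.2) := by
  induction ls with
  | nil => intro c b s; simp [F]
  | cons raw rest ih =>
    intro c b s
    simp only [List.foldl_cons, List.map_cons]
    by_cases h0 : PySem.Str.strip raw = ""
    · have hstep : stepA (c, b, s) raw = (c, b, s) := by
        simp only [stepA]; rw [if_pos h0]
      have hF : F s (PySem.Str.strip raw :: List.map PySem.Str.strip rest)
          = F s (List.map PySem.Str.strip rest) := by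
        simp only [F]; rw [if_pos h0]
      rw [hstep, ih, hF]
    · by_cases h1 : PySem.Str.startswith (PySem.Str.upper (PySem.Str.strip raw)) "CLOZE" = true
      · have hstep : stepA (c, b, s) raw = (c, b, some "cloze") := by
          simp only [stepA]; rw [if_neg h0, if_pos h1]
        have hF : F s (PySem.Str.strip raw :: List.map PySem.Str.strip rest)
            = F (some "cloze") (List.map PySem.Str.strip rest) := by
          simp only [F]; rw [if_neg h0, if_pos h1]
        rw [hstep, ih, hF]
      · by_cases h2 : PySem.Str.startswith (PySem.Str.upper (PySem.Str.strip raw)) "BASIC" = true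
        · have hstep : stepA (c, b, s) raw = (c, b, some "basic") := by
            simp only [stepA]; rw [if_neg h0, if_neg h1, if_pos h2]
          have hF : F s (PySem.Str.strip raw :: List.map PySem.Str.strip rest)
              = F (some "basic") (List.map PySem.Str.strip rest) := by
            simp only [F]; rw [if_neg h0, if_neg h1, if_pos h2]
          rw [hstep, ih, hF]
        · by_cases h3 : s = some "cloze"
          · have hstep : stepA (c, b, s) raw = (c ++ [PySem.Str.strip raw], b, s) := by
              simp only [stepA]; rw [if_neg h0, if_neg h1, if_neg h2, if_pos h3]
            have hF : F s (PySem.Str.strip raw :: List.map PySem.Str.strip rest)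
                = (PySem.Str.strip raw :: (F s (List.map PySem.Str.strip rest)).1,
                   (F s (List.map PySem.Str.strip rest)).2.1,
                   (F s (List.map PySem.Str.strip rest)).2.2) := by
              simp only [F]; rw [if_neg h0, if_neg h1, if_neg h2, if_pos h3]
            rw [hstep, ih, hF]
            simp
          · by_cases h4 : s = some "basic"
            · have hstep : stepA (c, b, s) raw = (c, b ++ [PySem.Str.strip raw], s) := by
                simp only [stepA]; rw [if_neg h0, if_neg h1, if_neg h2, if_neg h3, if_pos h4]
              have hF : F s (PySem.Str.strip raw :: List.map PySem.Str.strip rest)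
                  = ((F s (List.map PySem.Str.strip rest)).1,
                     PySem.Str.strip raw :: (F s (List.map PySem.Str.strip rest)).2.1,
                     (F s (List.map PySem.Str.strip rest)).2.2) := by
                simp only [F]; rw [if_neg h0, if_neg h1, if_neg h2, if_neg h3, if_pos h4]
              rw [hstep, ih, hF]
              simp
            · have hstep : stepA (c, b, s) raw = (c, b, s) := by
                simp only [stepA]; rw [if_neg h0, if_neg h1, if_neg h2, if_neg h3, if_neg h4]
              have hF : F s (PySem.Str.strip raw :: List.map PySem.Str.strip rest)
                  = F s (List.map PySem.Str.strip rest) := by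
                simp only [F]; rw [if_neg h0, if_neg h1, if_neg h2, if_neg h3, if_neg h4]
              rw [hstep, ih, hF]

-- a line with a kind is not blank and fires the corresponding header branch of F
theorem noK_false_cases (l : String) (h : noK l = false) :
    l ≠ "" ∧ ((PySem.Str.startswith (PySem.Str.upper l) "CLOZE" = true ∧ kindOf l = some "cloze")
      ∨ (PySem.Str.startswith (PySem.Str.upper l) "CLOZE" = false ∧
         PySem.Str.startswith (PySem.Str.upper l) "BASIC" = true ∧ kindOf l = some "basic")) := by
  have hne : l ≠ "" := by
    intro he; subst he
    have : noK "" = true := by decide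
    rw [this] at h; exact absurd h (by decide)
  refine ⟨hne, ?_⟩
  by_cases h1 : PySem.Str.startswith (PySem.Str.upper l) "CLOZE" = true
  · exact Or.inl ⟨h1, by simp only [kindOf]; rw [if_pos h1]⟩
  · by_cases h2 : PySem.Str.startswith (PySem.Str.upper l) "BASIC" = true
    · exact Or.inr ⟨Bool.eq_false_iff.mpr h1, h2, by simp only [kindOf]; rw [if_neg h1, if_pos h2]⟩
    · exfalso
      have : noK l = true := by
        simp only [noK, kindOf]; rw [if_neg h1, if_neg h2]; rfl
      rw [this] at h; exact absurd h (by decide)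

-- in section-less state F skips everything up to the first header
-- a line without a kind fires neither header branch
theorem noK_true_cases (l : String) (h : noK l = true) :
    PySem.Str.startswith (PySem.Str.upper l) "CLOZE" = false ∧
    PySem.Str.startswith (PySem.Str.upper l) "BASIC" = false := by
  simp only [noK, kindOf] at h
  by_cases h1 : PySem.Str.startswith (PySem.Str.upper l) "CLOZE" = true
  · rw [if_pos h1] at h; exact absurd h (by decide)
  · by_cases h2 : PySem.Str.startswith (PySem.Str.upper l) "BASIC" = true
    · rw [if_neg h1, if_pos h2] at h; exact absurd h (by decide)
    · exact ⟨Bool.eq_false_iff.mpr h1, Bool.eq_false_iff.mpr h2⟩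

theorem F_none_drop (ls : List String) : F none ls = F none (ls.dropWhile noK) := by
  induction ls with
  | nil => rfl
  | cons l rest ih =>
    by_cases hn : noK l = true
    · obtain ⟨hC, hB⟩ := noK_true_cases l hn
      rw [List.dropWhile_cons_of_pos hn, ← ih]
      by_cases h0 : l = ""
      · simp only [F]; rw [if_pos h0]
      · simp only [F]
        rw [if_neg h0, if_neg (by rw [hC]; exact Bool.false_ne_true),
          if_neg (by rw [hB]; exact Bool.false_ne_true),
          if_neg (by decide : ¬ (none : Option String) = some "cloze"),
          if_neg (by decide : ¬ (none : Option String) = some "basic")]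
    · rw [List.dropWhile_cons_of_neg hn]

-- inside a section, F pours the non-blank lines of the block into that section's list
theorem F_cloze_seg (ls : List String) :
    (F (some "cloze") ls).1
      = (ls.takeWhile noK).filter (fun x => x ≠ "") ++ (F (some "cloze") (ls.dropWhile noK)).1
    ∧ (F (some "cloze") ls).2.1 = (F (some "cloze") (ls.dropWhile noK)).2.1 := by
  induction ls with
  | nil => exact ⟨rfl, rfl⟩
  | cons l rest ih =>
    by_cases hn : noK l = true
    · obtain ⟨hC, hB⟩ := noK_true_cases l hn
      rw [List.takeWhile_cons_of_pos hn, List.dropWhile_cons_of_pos hn]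
      by_cases h0 : l = ""
      · have hF : F (some "cloze") (l :: rest) = F (some "cloze") rest := by
          simp only [F]; rw [if_pos h0]
        rw [hF, List.filter_cons_of_neg (by simp [h0])]
        exact ih
      · have hF : F (some "cloze") (l :: rest) = (l :: (F (some "cloze") rest).1, (F (some "cloze") rest).2.1, (F (some "cloze") rest).2.2) := by
          simp only [F]
          rw [if_neg h0, if_neg (by rw [hC]; exact Bool.false_ne_true),
            if_neg (by rw [hB]; exact Bool.false_ne_true)]
          simp
        rw [hF, List.filter_cons_of_pos (by simpa using h0)]
        simp only [List.cons_append]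
        exact ⟨by rw [ih.1], ih.2⟩
    · rw [List.takeWhile_cons_of_neg hn, List.dropWhile_cons_of_neg hn]
      exact ⟨by simp, rfl⟩

theorem F_basic_seg (ls : List String) :
    (F (some "basic") ls).2.1
      = (ls.takeWhile noK).filter (fun x => x ≠ "") ++ (F (some "basic") (ls.dropWhile noK)).2.1
    ∧ (F (some "basic") ls).1 = (F (some "basic") (ls.dropWhile noK)).1 := by
  induction ls with
  | nil => exact ⟨rfl, rfl⟩
  | cons l rest ih =>
    by_cases hn : noK l = true
    · obtain ⟨hC, hB⟩ := noK_true_cases l hn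
      rw [List.takeWhile_cons_of_pos hn, List.dropWhile_cons_of_pos hn]
      by_cases h0 : l = ""
      · have hF : F (some "basic") (l :: rest) = F (some "basic") rest := by
          simp only [F]; rw [if_pos h0]
        rw [hF, List.filter_cons_of_neg (by simp [h0])]
        exact ih
      · have hF : F (some "basic") (l :: rest) = ((F (some "basic") rest).1, l :: (F (some "basic") rest).2.1, (F (some "basic") rest).2.2) := by
          simp only [F]
          rw [if_neg h0, if_neg (by rw [hC]; exact Bool.false_ne_true),
            if_neg (by rw [hB]; exact Bool.false_ne_true)]
          simp
        rw [hF, List.filter_cons_of_pos (by simpa using h0)]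
        simp only [List.cons_append]
        exact ⟨by rw [ih.1], ih.2⟩
    · rw [List.takeWhile_cons_of_neg hn, List.dropWhile_cons_of_neg hn]
      exact ⟨by simp, rfl⟩

-- a header line overwrites the state, so past a header the start state is irrelevant
theorem F_override (ds : List String) (hds : ds.dropWhile noK = ds) (s s' : Option String) :
    ((F s ds).1, (F s ds).2.1) = ((F s' ds).1, (F s' ds).2.1) := by
  cases ds with
  | nil => rfl
  | cons h rest =>
    have hh : noK h = false := by
      by_contra hc
      have hh' : noK h = true := Bool.of_not_eq_false hc
      rw [List.dropWhile_cons_of_pos hh'] at hds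
      have := congrArg List.length hds
      have hle := List.length_dropWhile_le noK rest
      simp at this; omega
    obtain ⟨hne, hcase⟩ := noK_false_cases h hh
    rcases hcase with ⟨hC, _⟩ | ⟨hC, hB, _⟩
    · have key : ∀ t : Option String, F t (h :: rest) = F (some "cloze") rest := by
        intro t; simp only [F]; rw [if_neg hne, if_pos hC]
      rw [key s, key s']
    · have key : ∀ t : Option String, F t (h :: rest) = F (some "basic") rest := by
        intro t; simp only [F]
        rw [if_neg hne, if_neg (by rw [hC]; exact Bool.false_ne_true), if_pos hB]
      rw [key s, key s']

theorem goB_eq_F (n : Nat) : ∀ ds : List String, ds.length ≤ n → ds.dropWhile noK = ds →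
    goB ds = ((F none ds).1, (F none ds).2.1) := by
  induction n with
  | zero =>
    intro ds hlen _
    have : ds = [] := List.length_eq_zero_iff.mp (Nat.le_zero.mp hlen)
    subst this; rw [goB]; rfl
  | succ n ih =>
    intro ds hlen hds
    cases ds with
    | nil => rw [goB]; rfl
    | cons h rest =>
      have hh : noK h = false := by
        by_contra hc
        have hh' : noK h = true := Bool.of_not_eq_false hc
        rw [List.dropWhile_cons_of_pos hh'] at hds
        have := congrArg List.length hds
        have hle := List.length_dropWhile_le noK rest
        simp at this; omega
      obtain ⟨hne, hcase⟩ := noK_false_cases h hh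
      have hlen' : (rest.dropWhile noK).length ≤ n := by
        have := List.length_dropWhile_le noK rest
        simp at hlen; omega
      have hidem := List.dropWhile_idempotent noK rest
      have hrec := ih (rest.dropWhile noK) hlen' hidem
      rw [goB]
      rcases hcase with ⟨hC, hk⟩ | ⟨hC, hB, hk⟩
      · have hF : F none (h :: rest) = F (some "cloze") rest := by
          simp only [F]; rw [if_neg hne, if_pos hC]
        have hov := F_override (rest.dropWhile noK) hidem (some "cloze") none
        obtain ⟨hs1, hs2⟩ := F_cloze_seg rest
        rw [if_pos hk, hrec, hF, hs1, hs2]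
        have h1 := congrArg Prod.fst hov
        have h2 := congrArg Prod.snd hov
        simp at h1 h2
        rw [h1, h2]
      · have hF : F none (h :: rest) = F (some "basic") rest := by
          simp only [F]
          rw [if_neg hne, if_neg (by rw [hC]; exact Bool.false_ne_true), if_pos hB]
        have hov := F_override (rest.dropWhile noK) hidem (some "basic") none
        obtain ⟨hs1, hs2⟩ := F_basic_seg rest
        have hnotc : ¬ kindOf h = some "cloze" := by rw [hk]; decide
        rw [if_neg hnotc, hrec, hF, hs1, hs2]
        have h1 := congrArg Prod.fst hov
        have h2 := congrArg Prod.snd hov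
        simp at h1 h2
        rw [h1, h2]

-- ===== VERDICT (by name: the statement is the Claim_ definition above) =====
theorem split_cards_spec : Claim_equal_split_cards := by
  intro t _
  show _ = _
  unfold split_cards split_cards_alt
  rw [foldl_stepA_eq]
  set ms := (PySem.Str.splitlines t).map PySem.Str.strip with hms
  have h1 : F none ms = F none (ms.dropWhile noK) := F_none_drop ms
  have h2 := goB_eq_F (ms.dropWhile noK).length (ms.dropWhile noK) le_rfl
    (List.dropWhile_idempotent noK ms)
  simp only [List.nil_append, h1, h2]
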